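-- pv_equiv track=rewrite | github.com/cisco-en-programmability/sdwan-terraform-stackit | scripts/cert_api_script.py | select_best_row
-- ===== SOURCE A (Python) =====
-- from typing import Any, Dict, Iterable, List, Optional
--
-- def controller_cert_installed(row: Dict[str, Any]) -> bool:
--     values = [
--         str(row.get("certInstallStatus") or ""),
--         str(row.get("state") or ""),
--     ]
--     normalized = [value.lower().replace(" ", "") for value in values if value]
--     return any(
--         status in {"installed", "certinstalled"} or "certinstalled" in status
--         for status in normalized
--     )
--
-- def extract_csr_text(row: Dict[str, Any]) -> str:
--     for field in ("deviceCSR", "CSRDetail", "CSR"):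
--         value = str(row.get(field) or "").strip()
--         if not value or value.upper() == "N/A":
--             continue
--         if "BEGIN CERTIFICATE REQUEST" in value:
--             return value
--     return ""
--
-- def select_best_row(rows: Iterable[Dict[str, Any]]) -> Optional[Dict[str, Any]]:
--     best_row: Optional[Dict[str, Any]] = None
--     best_score = -1
--     for row in rows:
--         score = 0
--         if extract_csr_text(row):
--             score += 100
--         if controller_cert_installed(row):
--             score += 10
--         if str(row.get("state") or "").strip():
--             score += 5
--         if str(row.get("certInstallStatus") or "").strip():
--             score += 5
--         if str(row.get("__source") or "") == "record":
--             score += 2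
--         if score > best_score:
--             best_row = row
--             best_score = score
--     return best_row
-- ===== SOURCE B (Python) =====
-- from typing import Any, Dict, Iterable, List, Optional
--
-- def controller_cert_installed(row: Dict[str, Any]) -> bool:
--     values = [
--         str(row.get("certInstallStatus") or ""),
--         str(row.get("state") or ""),
--     ]
--     normalized = [value.lower().replace(" ", "") for value in values if value]
--     return any(
--         status in {"installed", "certinstalled"} or "certinstalled" in status
--         for status in normalized
--     )
--
-- def extract_csr_text(row: Dict[str, Any]) -> str:
--     for field in ("deviceCSR", "CSRDetail", "CSR"):
--         value = str(row.get(field) or "").strip()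
--         if not value or value.upper() == "N/A":
--             continue
--         if "BEGIN CERTIFICATE REQUEST" in value:
--             return value
--     return ""
--
-- def _row_score(row: Dict[str, Any]) -> int:
--     return (
--         (100 if extract_csr_text(row) else 0)
--         + (10 if controller_cert_installed(row) else 0)
--         + (5 if str(row.get("state") or "").strip() else 0)
--         + (5 if str(row.get("certInstallStatus") or "").strip() else 0)
--         + (2 if str(row.get("__source") or "") == "record" else 0)
--     )
--
-- def select_best_row(rows: Iterable[Dict[str, Any]]) -> Optional[Dict[str, Any]]:
--     # Two staged passes: first compute the best score over all rows,
--     # then return the first row attaining it (None when rows is empty).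
--     rows = list(rows)
--     best = max((_row_score(row) for row in rows), default=-1)
--     return next((row for row in rows if _row_score(row) == best), None)
-- ===== Notes on version B (the rewrite author's own statement) =====
-- stated objective: alternative
-- what changed: A's single running-max loop with a best_row/best_score accumulator is replaced by two staged passes: first compute the maximum per-row score (scoring extracted into a helper), then return the first row attaining it via next(..., None).
import Mathlib
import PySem

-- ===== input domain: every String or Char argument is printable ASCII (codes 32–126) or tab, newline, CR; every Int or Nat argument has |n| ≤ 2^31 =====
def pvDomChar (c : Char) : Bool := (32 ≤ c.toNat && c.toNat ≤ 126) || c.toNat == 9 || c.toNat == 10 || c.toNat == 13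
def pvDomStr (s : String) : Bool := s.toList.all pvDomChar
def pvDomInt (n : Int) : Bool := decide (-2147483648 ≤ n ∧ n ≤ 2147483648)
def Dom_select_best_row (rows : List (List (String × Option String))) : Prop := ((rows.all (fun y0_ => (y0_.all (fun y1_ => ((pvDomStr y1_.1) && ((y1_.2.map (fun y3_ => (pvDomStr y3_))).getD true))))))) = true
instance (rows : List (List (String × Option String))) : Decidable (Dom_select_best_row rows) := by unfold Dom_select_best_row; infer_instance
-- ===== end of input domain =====

-- B replaces A's running-max accumulator loop by two staged passes (max score, then
-- first row attaining it); same O(n), return value only.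

-- ===== PORT A =====
-- str(row.get(k) or ""): missing key or None (or "") become ""
def pyGetStr (row : List (String × Option String)) (k : String) : String :=
  match PySem.Dict.get? (PySem.Dict.mk row) k with
  | some (some s) => s
  | _ => ""

def controller_cert_installed (row : List (String × Option String)) : Bool :=
  let values := [pyGetStr row "certInstallStatus", pyGetStr row "state"]
  let normalized := (values.filter (fun v => v ≠ "")).map
    (fun v => PySem.Str.replace (PySem.Str.lower v) " " "")
  normalized.any (fun status =>
    (status == "installed" || status == "certinstalled") || PySem.Str.isIn "certinstalled" status)

-- the for-loop over the three field names, step for step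
def extract_csr_go (row : List (String × Option String)) : List String → String
  | [] => ""
  | f :: fs =>
    let value := PySem.Str.strip (pyGetStr row f)
    if value = "" || PySem.Str.upper value = "N/A" then extract_csr_go row fs
    else if PySem.Str.isIn "BEGIN CERTIFICATE REQUEST" value then value
    else extract_csr_go row fs

def extract_csr_text (row : List (String × Option String)) : String :=
  extract_csr_go row ["deviceCSR", "CSRDetail", "CSR"]

def select_best_row (rows : List (List (String × Option String))) : Option (List (String × Option String)) :=
  (rows.foldl
    (fun acc row =>
      let score : Int := 0
      let score := if extract_csr_text row ≠ "" then score + 100 else score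
      let score := if controller_cert_installed row then score + 10 else score
      let score := if PySem.Str.strip (pyGetStr row "state") ≠ "" then score + 5 else score
      let score := if PySem.Str.strip (pyGetStr row "certInstallStatus") ≠ "" then score + 5 else score
      let score := if pyGetStr row "__source" = "record" then score + 2 else score
      if score > acc.2 then (some row, score) else acc)
    ((none : Option (List (String × Option String))), (-1 : Int))).1

-- ===== PORT B =====
-- _row_score, one arithmetic expression
def rowScore (row : List (String × Option String)) : Int :=
  (if extract_csr_text row ≠ "" then (100 : Int) else 0)
  + (if controller_cert_installed row then 10 else 0)
  + (if PySem.Str.strip (pyGetStr row "state") ≠ "" then 5 else 0)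
  + (if PySem.Str.strip (pyGetStr row "certInstallStatus") ≠ "" then 5 else 0)
  + (if pyGetStr row "__source" = "record" then 2 else 0)

-- pass 1: best = max(scores, default=-1);  pass 2: next(first row with that score, None)
def select_best_row_alt (rows : List (List (String × Option String))) : Option (List (String × Option String)) :=
  let best := (rows.map rowScore).foldl max (-1 : Int)
  rows.find? (fun row => rowScore row == best)

-- ===== PRECONDITION & SPEC =====
def Spec_select_best_row (rows : List (List (String × Option String))) (out : Option (List (String × Option String))) : Prop := out = select_best_row_alt rows
instance (rows : List (List (String × Option String))) (out : Option (List (String × Option String))) : Decidable (Spec_select_best_row rows out) := by unfold Spec_select_best_row; infer_instance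

-- ===== CLAIM (what is proved, stated in full; the proofs are below) =====
def Claim_equal_select_best_row : Prop := ∀ (rows : List (List (String × Option String))), Dom_select_best_row rows → Spec_select_best_row rows (select_best_row rows)

-- ===== LEMMAS AND PROOFS =====

-- A's sequential score increments equal B's one-expression sum
theorem scoreA_eq_rowScore (row : List (String × Option String)) :
    (let score : Int := 0
     let score := if extract_csr_text row ≠ "" then score + 100 else score
     let score := if controller_cert_installed row then score + 10 else score
     let score := if PySem.Str.strip (pyGetStr row "state") ≠ "" then score + 5 else score
     let score := if PySem.Str.strip (pyGetStr row "certInstallStatus") ≠ "" then score + 5 else score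
     if pyGetStr row "__source" = "record" then score + 2 else score) = rowScore row := by
  unfold rowScore
  dsimp only
  split_ifs <;> omega

theorem rowScore_nonneg (row : List (String × Option String)) : 0 ≤ rowScore row := by
  unfold rowScore; split_ifs <;> omega

theorem foldl_max_comm (l : List Int) : ∀ a b : Int,
    l.foldl max (max a b) = max a (l.foldl max b) := by
  induction l with
  | nil => intro a b; rfl
  | cons x l ih =>
    intro a b
    simp only [List.foldl_cons, max_assoc]
    exact ih a (max b x)

theorem le_foldl_max (l : List Int) (a : Int) : a ≤ l.foldl max a := by
  induction l generalizing a with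
  | nil => exact le_refl a
  | cons x l ih =>
    simp only [List.foldl_cons]
    exact le_trans (le_max_left a x) (ih _)

-- the loop invariant: from any state (b, s), A's loop returns b unless some later
-- row strictly beats s, in which case it returns the first row attaining the
-- running maximum of s and the remaining scores
theorem loopA (rows : List (List (String × Option String))) :
    ∀ (b : Option (List (String × Option String))) (s : Int),
    (rows.foldl
      (fun acc row => if rowScore row > acc.2 then (some row, rowScore row) else acc)
      (b, s)).1
    = if (rows.map rowScore).foldl max s > s
      then rows.find? (fun row => rowScore row == (rows.map rowScore).foldl max s)
      else b := by
  induction rows with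
  | nil =>
    intro b s
    simp only [List.foldl_nil, List.map_nil]
    rw [if_neg (lt_irrefl s)]
  | cons r rs ih =>
    intro b s
    simp only [List.foldl_cons, List.map_cons]
    by_cases h : rowScore r > s
    · rw [if_pos h, ih]
      have hge : rowScore r ≤ (rs.map rowScore).foldl max (rowScore r) :=
        le_foldl_max _ _
      have hm : (rs.map rowScore).foldl max (max s (rowScore r))
          = (rs.map rowScore).foldl max (rowScore r) := by
        rw [foldl_max_comm]; exact max_eq_right (le_trans (le_of_lt h) hge)
      rw [hm]
      set m := (rs.map rowScore).foldl max (rowScore r) with hmdef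
      by_cases h2 : m > rowScore r
      · rw [if_pos h2, if_pos (lt_trans h h2),
            List.find?_cons_of_neg (by simp only [beq_iff_eq]; omega)]
      · have hmr : m = rowScore r := le_antisymm (not_lt.mp h2) hge
        rw [if_neg h2, if_pos (by omega : m > s),
            List.find?_cons_of_pos (by simp [hmr])]
    · rw [if_neg h, ih]
      have hmax : max s (rowScore r) = s := max_eq_left (not_lt.mp h)
      rw [hmax]
      set m := (rs.map rowScore).foldl max s with hmdef
      by_cases h2 : m > s
      · have hne : ¬ ((fun row => rowScore row == m) r = true) := by
          simp only [beq_iff_eq]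
          have := not_lt.mp h
          omega
        rw [if_pos h2, if_pos h2]
        exact (List.find?_cons_of_neg (p := fun row => rowScore row == m) hne).symm
      · rw [if_neg h2, if_neg h2]

-- ===== VERDICT (by name: the statement is the Claim_ definition above) =====
theorem select_best_row_spec : Claim_equal_select_best_row := by
  intro rows _
  unfold Spec_select_best_row select_best_row select_best_row_alt
  simp only [scoreA_eq_rowScore]
  rw [loopA]
  set m := (rows.map rowScore).foldl max (-1 : Int) with hm
  by_cases h : m > -1
  · rw [if_pos h]
  · rw [if_neg h]
    have hmr : m = -1 := le_antisymm (not_lt.mp h) (le_foldl_max _ _)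
    symm
    rw [List.find?_eq_none]
    intro r _
    simp only [beq_iff_eq, hmr]
    have := rowScore_nonneg r
    omega
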